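-- pv_equiv track=rewrite | github.com/fayezacce/FFP-DataValidation | backend/app/validator.py | check_fake_nid
-- ===== SOURCE A (Python) =====
-- def check_fake_nid(nid: str, tz_limit: int = 0, tz_whitelist: set = None) -> tuple[bool, str]:
--     """Detect suspicious NID patterns. Returns (is_suspicious, reason).
--     Called AFTER length validation passes (nid is already digits-only)."""
--     if not nid or len(nid) < 10:
--         return False, ""
--
--     # All zeros (e.g. 0000000000)
--     if all(c == '0' for c in nid):
--         return True, "All-zero NID"
--
--     # All same digit (e.g. 1111111111)
--     if len(set(nid)) == 1:
--         return True, "All-same-digit NID"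
--
--     # Trust whitelisted NIDs fully (skip all further fraud checks)
--     if tz_whitelist and nid in tz_whitelist:
--         return False, ""
--
--     # Trailing zero check for 17-digit NIDs only
--     if len(nid) == 17:
--         if tz_whitelist and nid in tz_whitelist:
--             pass  # Whitelisted, skip trailing zero check
--         elif tz_limit > 0:
--             # Count how many trailing zeros the NID has
--             trailing_zeros = len(nid) - len(nid.rstrip('0'))
--             if trailing_zeros >= tz_limit:
--                 if tz_limit == 2:
--                     return True, "Trailing double-zero NID"
--                 else:
--                     return True, f"Trailing {tz_limit}+ zero NID"
--
--     # Ascending sequential run of 7+ consecutive digits (e.g. 1234567)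
--     for i in range(len(nid) - 6):
--         chunk = nid[i:i+7]
--         if all(int(chunk[j+1]) == int(chunk[j]) + 1 for j in range(6)):
--             return True, "Sequential ascending digit pattern detected"
--
--     # Descending sequential run of 7+
--     for i in range(len(nid) - 6):
--         chunk = nid[i:i+7]
--         if all(int(chunk[j+1]) == int(chunk[j]) - 1 for j in range(6)):
--             return True, "Sequential descending digit pattern detected"
--
--     return False, ""
-- ===== SOURCE B (Python) =====
-- def check_fake_nid(nid: str, tz_limit: int = 0, tz_whitelist: set = None) -> tuple[bool, str]:
--     """Same guards as the original; the two 7-wide window scans are replaced by a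
--     single left-to-right pass maintaining ascending/descending run counters."""
--     if not nid or len(nid) < 10:
--         return False, ""
--
--     if all(c == '0' for c in nid):
--         return True, "All-zero NID"
--
--     if len(set(nid)) == 1:
--         return True, "All-same-digit NID"
--
--     if tz_whitelist and nid in tz_whitelist:
--         return False, ""
--
--     # The whitelist was already handled above, so the 17-digit trailing-zero
--     # check only needs the tz_limit test.
--     if len(nid) == 17 and tz_limit > 0:
--         trailing_zeros = 0
--         for ch in reversed(nid):
--             if ch == '0':
--                 trailing_zeros += 1
--             else:
--                 break
--         if trailing_zeros >= tz_limit: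
--             if tz_limit == 2:
--                 return True, "Trailing double-zero NID"
--             return True, f"Trailing {tz_limit}+ zero NID"
--
--     # One pass: run lengths of consecutive +1 / -1 steps.
--     asc = desc = 1
--     has_asc = has_desc = False
--     prev = int(nid[0])
--     for ch in nid[1:]:
--         cur = int(ch)
--         asc = asc + 1 if cur == prev + 1 else 1
--         desc = desc + 1 if cur == prev - 1 else 1
--         has_asc = has_asc or asc >= 7
--         has_desc = has_desc or desc >= 7
--         prev = cur
--     if has_asc:
--         return True, "Sequential ascending digit pattern detected"
--     if has_desc:
--         return True, "Sequential descending digit pattern detected"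
--     return False, ""
-- ===== Notes on version B (the rewrite author's own statement) =====
-- stated objective: alternative
-- what changed: The two sliding 7-character window scans (each re-slicing the string and re-converting 7 digits at every position, ascending then descending) are replaced by a single left-to-right pass that maintains ascending/descending run-length counters and two hit flags.
-- outside the precondition, e.g. on check_fake_nid('111111111X', 0, None): A returns (False, ''), B raises ValueError
import Mathlib
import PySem

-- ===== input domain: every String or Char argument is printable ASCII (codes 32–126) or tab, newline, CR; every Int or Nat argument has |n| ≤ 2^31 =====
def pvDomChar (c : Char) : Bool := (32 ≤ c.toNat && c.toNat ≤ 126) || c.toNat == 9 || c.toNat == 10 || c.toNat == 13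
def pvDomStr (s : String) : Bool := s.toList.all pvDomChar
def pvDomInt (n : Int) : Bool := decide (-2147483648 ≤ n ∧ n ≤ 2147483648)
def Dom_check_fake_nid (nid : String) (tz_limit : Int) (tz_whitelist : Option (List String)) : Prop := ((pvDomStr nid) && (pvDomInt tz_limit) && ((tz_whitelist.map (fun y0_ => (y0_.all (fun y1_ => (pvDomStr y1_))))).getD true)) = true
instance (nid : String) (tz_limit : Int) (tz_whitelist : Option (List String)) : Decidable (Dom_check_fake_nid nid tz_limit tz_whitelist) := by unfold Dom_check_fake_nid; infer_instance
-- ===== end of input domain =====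

-- B replaces A's two sliding 7-character window scans by one left-to-right pass with run counters (alternative algorithm, same cost).

-- ===== PORT A =====
-- int(c) for a single digit character (exact on '0'..'9'; Pre_ excludes the inputs whose
-- scan loops would reach a non-digit character, where Python raises ValueError)
def pvDigit (c : Char) : Int := (c.toNat : Int) - 48

-- Python truthiness + membership: `tz_whitelist and nid in tz_whitelist`
def pvWlHit (tz_whitelist : Option (List String)) (nid : String) : Bool :=
  match tz_whitelist with
  | none => false
  | some l => !l.isEmpty && l.contains nid

-- chunk = nid[i:i+7]; all(int(chunk[j+1]) == int(chunk[j]) + 1 for j in range(6))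
def pvAscWin (cs : List Char) (i : Int) : Bool :=
  let chunk := PySem.List.slice cs (some i) (some (i + 7))
  (PySem.List.pyRange 0 6 1).all (fun j =>
    pvDigit (PySem.List.pyGetD chunk (j + 1) ' ') == pvDigit (PySem.List.pyGetD chunk j ' ') + 1)

-- all(int(chunk[j+1]) == int(chunk[j]) - 1 for j in range(6))
def pvDescWin (cs : List Char) (i : Int) : Bool :=
  let chunk := PySem.List.slice cs (some i) (some (i + 7))
  (PySem.List.pyRange 0 6 1).all (fun j =>
    pvDigit (PySem.List.pyGetD chunk (j + 1) ' ') == pvDigit (PySem.List.pyGetD chunk j ' ') - 1)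

-- `for i in range(len(nid) - 6): if <ascending window>: return True`, early return on first hit
def pvAscLoop (cs : List Char) : List Int → Bool
  | [] => false
  | i :: rest => if pvAscWin cs i then true else pvAscLoop cs rest

def pvDescLoop (cs : List Char) : List Int → Bool
  | [] => false
  | i :: rest => if pvDescWin cs i then true else pvDescLoop cs rest

-- the tail of A: the two window-scan loops and the final return
def pvSeqScanA (cs : List Char) : Bool × String :=
  if pvAscLoop cs (PySem.List.pyRange 0 ((cs.length : Int) - 6) 1) then
    (true, "Sequential ascending digit pattern detected")
  else if pvDescLoop cs (PySem.List.pyRange 0 ((cs.length : Int) - 6) 1) then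
    (true, "Sequential descending digit pattern detected")
  else (false, "")

def check_fake_nid (nid : String) (tz_limit : Int) (tz_whitelist : Option (List String)) : Bool × String :=
  if nid.toList = [] ∨ nid.toList.length < 10 then (false, "")
  else if nid.toList.all (fun c => c == '0') then (true, "All-zero NID")
  else if PySem.Set.len (PySem.Set.ofList nid.toList) == 1 then (true, "All-same-digit NID")
  else if pvWlHit tz_whitelist nid then (false, "")
  else if nid.toList.length = 17 then
    (if pvWlHit tz_whitelist nid then pvSeqScanA nid.toList  -- `pass`: fall through to the scans
     else if 0 < tz_limit then
       -- trailing_zeros = len(nid) - len(nid.rstrip('0')); rstrip('0') ported exactly as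
       -- dropping the trailing '0' characters
       (if tz_limit ≤ (nid.toList.length : Int) -
            (((nid.toList.reverse.dropWhile (fun c => c == '0')).reverse).length : Int) then
          (if tz_limit = 2 then (true, "Trailing double-zero NID")
           else (true, "Trailing " ++ PySem.Int.toStr tz_limit ++ "+ zero NID"))
        else pvSeqScanA nid.toList)
     else pvSeqScanA nid.toList)
  else pvSeqScanA nid.toList

-- ===== PORT B =====
-- B's single pass, carrying prev digit, asc/desc run lengths and the two hit flags
def pvRunPass : List Char → Int → Int → Int → Bool → Bool → Bool × Bool
  | [], _, _, _, has_asc, has_desc => (has_asc, has_desc)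
  | ch :: rest, prev, asc, desc, has_asc, has_desc =>
      let cur := pvDigit ch
      let asc' := if cur == prev + 1 then asc + 1 else 1
      let desc' := if cur == prev - 1 then desc + 1 else 1
      pvRunPass rest cur asc' desc' (has_asc || decide (7 ≤ asc')) (has_desc || decide (7 ≤ desc'))

-- the tail of B: prev = int(nid[0]); the run-counting pass over nid[1:]; the final return
def pvSeqScanB (cs : List Char) : Bool × String :=
  let r := pvRunPass cs.tail (pvDigit (cs.headD '0')) 1 1 false false
  if r.1 then (true, "Sequential ascending digit pattern detected")
  else if r.2 then (true, "Sequential descending digit pattern detected")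
  else (false, "")

-- B's trailing_zeros: counting trailing '0' characters from the end (the for/break loop)
def pvTrailingZeros (cs : List Char) : Int :=
  ((cs.reverse.takeWhile (fun c => c == '0')).length : Int)

def check_fake_nid_alt (nid : String) (tz_limit : Int) (tz_whitelist : Option (List String)) : Bool × String :=
  if nid.toList = [] ∨ nid.toList.length < 10 then (false, "")
  else if nid.toList.all (fun c => c == '0') then (true, "All-zero NID")
  else if PySem.Set.len (PySem.Set.ofList nid.toList) == 1 then (true, "All-same-digit NID")
  else if pvWlHit tz_whitelist nid then (false, "")
  else if nid.toList.length = 17 ∧ 0 < tz_limit then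
    (if tz_limit ≤ pvTrailingZeros nid.toList then
       (if tz_limit = 2 then (true, "Trailing double-zero NID")
        else (true, "Trailing " ++ PySem.Int.toStr tz_limit ++ "+ zero NID"))
     else pvSeqScanB nid.toList)
  else pvSeqScanB nid.toList

-- ===== PRECONDITION & SPEC =====
-- Pre_ excludes the strings of length ≥ 10 containing a non-digit character that fall through
-- every guard clause: on those A (and B) generally raises ValueError in int(), and on the few
-- of them where A's lazily evaluated window scan returns before touching the non-digit, B's
-- full pass still raises.
def Pre_check_fake_nid (nid : String) (tz_limit : Int) (tz_whitelist : Option (List String)) : Prop :=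
  nid.toList.length < 10
  ∨ (∀ c ∈ nid.toList, PySem.Chars.isdigit c = true)
  ∨ (∀ c ∈ nid.toList, c = nid.toList.headD '0')
  ∨ pvWlHit tz_whitelist nid = true
  ∨ (nid.toList.length = 17 ∧ 0 < tz_limit ∧ tz_limit ≤ pvTrailingZeros nid.toList)

instance (nid : String) (tz_limit : Int) (tz_whitelist : Option (List String)) : Decidable (Pre_check_fake_nid nid tz_limit tz_whitelist) := by unfold Pre_check_fake_nid; infer_instance

def pvWitness_check_fake_nid : String × Int × Option (List String) := ("5", 0, none)

def Spec_check_fake_nid (nid : String) (tz_limit : Int) (tz_whitelist : Option (List String)) (out : Bool × String) : Prop := out = check_fake_nid_alt nid tz_limit tz_whitelist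
instance (nid : String) (tz_limit : Int) (tz_whitelist : Option (List String)) (out : Bool × String) : Decidable (Spec_check_fake_nid nid tz_limit tz_whitelist out) := by unfold Spec_check_fake_nid; infer_instance

-- ===== CLAIM (what is proved, stated in full; the proofs are below) =====
def Claim_equal_check_fake_nid : Prop := ∀ (nid : String) (tz_limit : Int) (tz_whitelist : Option (List String)), Dom_check_fake_nid nid tz_limit tz_whitelist → Pre_check_fake_nid nid tz_limit tz_whitelist → Spec_check_fake_nid nid tz_limit tz_whitelist (check_fake_nid nid tz_limit tz_whitelist)

-- ===== LEMMAS AND PROOFS =====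

def pvDiffs : List Int → List Int
  | a :: b :: l => (b - a) :: pvDiffs (b :: l)
  | _ => []
theorem length_pvDiffs : ∀ (l : List Int), (pvDiffs l).length = l.length - 1
  | [] => rfl
  | [_] => rfl
  | a :: b :: l => by
      have := length_pvDiffs (b :: l)
      simp [pvDiffs] at this ⊢; omega
theorem getD_pvDiffs : ∀ (l : List Int) (k : Nat), k + 1 < l.length →
    (pvDiffs l).getD k 0 = l.getD (k + 1) 0 - l.getD k 0
  | a :: b :: l, 0, _ => by simp [pvDiffs]
  | a :: b :: l, k + 1, h => by
      have hk : k + 1 < (b :: l).length := by simp at h ⊢; omega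
      have := getD_pvDiffs (b :: l) k hk
      simpa [pvDiffs] using this
  | [], k, h => by simp at h
  | [_], k, h => by simp at h
theorem take6_all_iff (X : List Int) (t : Int) (h : 6 ≤ X.length) :
    (((X.take 6).all (· == t)) = true ↔ ∀ k, k < 6 → X.getD k 0 = t) := by
  obtain ⟨a, b, c, d, e, f, Y, rfl⟩ : ∃ a b c d e f Y, X = a :: b :: c :: d :: e :: f :: Y := by
    match X, h with
    | a :: b :: c :: d :: e :: f :: Y, _ => exact ⟨a, b, c, d, e, f, Y, rfl⟩
  simp [List.take, List.all]
  constructor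
  · rintro ⟨h0, h1, h2, h3, h4, h5⟩ k hk
    interval_cases k <;> simpa
  · intro hk
    exact ⟨by simpa using hk 0 (by omega), by simpa using hk 1 (by omega),
           by simpa using hk 2 (by omega), by simpa using hk 3 (by omega),
           by simpa using hk 4 (by omega), by simpa using hk 5 (by omega)⟩
def pvG (t : Int) : List Int → Bool
  | [] => false
  | d :: l => (if (d :: l).length < 6 then false else ((d :: l).take 6).all (· == t)) || pvG t l
theorem pvG_short (t : Int) : ∀ (l : List Int), l.length < 6 → pvG t l = false
  | [], _ => rfl
  | d :: l, h => by
      have ih := pvG_short t l (by simp at h ⊢; omega)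
      simp only [pvG, if_pos h, ih, Bool.false_or]
theorem pvG_head (t : Int) (l : List Int) (h : 6 ≤ l.length)
    (hall : ((l.take 6).all (· == t)) = true) : pvG t l = true := by
  match l, h with
  | d :: l, h =>
    simp only [pvG, if_neg (Nat.not_lt.mpr h), hall, Bool.true_or]
theorem take6_rep_false (t d : Int) (l : List Int) (m : Nat) (hm : m ≤ 5) (hd : d ≠ t) :
    (((List.replicate m t ++ d :: l).take 6).all (· == t)) = false := by
  interval_cases m <;> simp [List.replicate, List.take, List.all, hd]
theorem pvG_strip (t d : Int) (l : List Int) : ∀ (m : Nat), m ≤ 5 → d ≠ t →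
    pvG t (List.replicate m t ++ d :: l) = pvG t l
  | 0, _, hd => by
      have hfalse : ((List.take 6 (d :: l)).all (· == t)) = false := by
        simpa using take6_rep_false t d l 0 (by omega) hd
      simp only [List.replicate_zero, List.nil_append, pvG]
      by_cases h6 : (d :: l).length < 6
      · rw [if_pos h6, Bool.false_or]
      · rw [if_neg h6, hfalse, Bool.false_or]
  | m + 1, hm, hd => by
      have ih := pvG_strip t d l m (by omega) hd
      have hrep : List.replicate (m + 1) t ++ d :: l = t :: (List.replicate m t ++ d :: l) := by
        simp [List.replicate_succ]
      have hfalse : (((t :: (List.replicate m t ++ d :: l)).take 6).all (· == t)) = false := by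
        have := take6_rep_false t d l (m + 1) hm hd
        rwa [hrep] at this
      rw [hrep]
      simp only [pvG]
      by_cases h6 : (t :: (List.replicate m t ++ d :: l)).length < 6
      · rw [if_pos h6, Bool.false_or, ih]
      · rw [if_neg h6, hfalse, Bool.false_or, ih]
def pvF (t : Int) : List Int → Int → Bool → Bool
  | [], _, h => h
  | d :: l, a, h => let a' := if d == t then a + 1 else 1; pvF t l a' (h || decide (7 ≤ a'))
theorem pvF_eq_pvG (t : Int) : ∀ (l : List Int) (a : Int) (h : Bool), 1 ≤ a →
    (7 ≤ a → h = true) →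
    pvF t l a h = (h || pvG t (List.replicate (a - 1).toNat t ++ l))
  | [], a, h, ha, hh => by
      cases h with
      | true => simp [pvF]
      | false =>
        have ha7 : a < 7 := by
          by_contra hc
          exact absurd (hh (by omega)) (by simp)
        simp only [pvF, Bool.false_or]
        rw [List.append_nil, pvG_short t _ (by simp; omega)]
  | d :: l, a, h, ha, hh => by
      simp only [pvF]
      by_cases hdt : d = t
      · have hcond : (d == t) = true := by simpa using hdt
        simp only [hcond, if_true]
        have ih := pvF_eq_pvG t l (a + 1) (h || decide (7 ≤ a + 1)) (by omega)
          (by intro _; simp; omega)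
        rw [ih]
        have hrep : List.replicate (a + 1 - 1).toNat t ++ l
            = List.replicate (a - 1).toNat t ++ d :: l := by
          have : (a + 1 - 1).toNat = (a - 1).toNat + 1 := by omega
          rw [this, List.replicate_succ', hdt]
          simp
        rw [hrep]
        by_cases h7 : 7 ≤ a + 1
        · have : pvG t (List.replicate (a - 1).toNat t ++ d :: l) = true := by
            rw [← hrep]
            apply pvG_head
            · simp only [List.length_append, List.length_replicate]; omega
            · have : (List.replicate (a + 1 - 1).toNat t ++ l).take 6
                  = List.replicate 6 t := by
                rw [List.take_append_of_le_length (by simp only [List.length_replicate]; omega), List.take_replicate]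
                congr 1; omega
              rw [this]; simp
          have h7' : decide (7 ≤ a + 1) = true := by simpa using h7
          rw [this, h7']
          simp only [Bool.or_true]
        · have h7' : decide (7 ≤ a + 1) = false := by simpa using h7
          rw [h7', Bool.or_false]
      · have hcond : (d == t) = false := by simpa using hdt
        simp only [hcond, Bool.false_eq_true, if_false]
        have ih := pvF_eq_pvG t l 1 (h || decide ((7:Int) ≤ 1)) (by omega)
          (by intro hc; omega)
        rw [ih]
        have : decide ((7:Int) ≤ 1) = false := by decide
        rw [this, Bool.or_false]
        simp only [show ((1:Int) - 1).toNat = 0 from rfl, List.replicate_zero, List.nil_append]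
        cases h with
        | true => simp
        | false =>
          have ha7 : a < 7 := by
            by_contra hc
            exact absurd (hh (by omega)) (by simp)
          simp only [Bool.false_or]
          rw [pvG_strip t d l (a - 1).toNat (by omega) hdt]
theorem getD_map_digit (cs : List Char) (m : Nat) (hm : m < cs.length) :
    (cs.map pvDigit).getD m 0 = pvDigit (cs.getD m ' ') := by
  rw [List.getD_eq_getElem _ _ (by simpa using hm), List.getD_eq_getElem _ _ hm,
      List.getElem_map]
theorem getD_drop_ds (cs : List Char) (i k : Nat) (h : i + k + 2 ≤ cs.length) :
    ((pvDiffs (cs.map pvDigit)).drop i).getD k 0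
      = pvDigit (cs.getD (i + k + 1) ' ') - pvDigit (cs.getD (i + k) ' ') := by
  have hlen : (pvDiffs (cs.map pvDigit)).length = cs.length - 1 := by
    rw [length_pvDiffs]; simp
  have h1 : i + k < (pvDiffs (cs.map pvDigit)).length := by omega
  rw [List.getD_eq_getElem _ _ (by simp [hlen]; omega), List.getElem_drop,
      ← List.getD_eq_getElem _ (0 : Int) h1,
      getD_pvDiffs _ _ (by simp; omega),
      getD_map_digit _ _ (by omega), getD_map_digit _ _ (by omega)]
def pvWinG (t : Int) (cs : List Char) (i : Int) : Bool :=
  let chunk := PySem.List.slice cs (some i) (some (i + 7))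
  (PySem.List.pyRange 0 6 1).all (fun j =>
    pvDigit (PySem.List.pyGetD chunk (j + 1) ' ') == pvDigit (PySem.List.pyGetD chunk j ' ') + t)
theorem chunk_eq (cs : List Char) (i : Nat) :
    PySem.List.slice cs (some (i : Int)) (some ((i : Int) + 7)) = (cs.drop i).take 7 := by
  rw [PySem.List.slice_toNat cs (by omega) (by omega)]
  have h1 : ((i : Int) + 7).toNat - ((i : Int)).toNat = 7 := by omega
  have h2 : ((i : Int)).toNat = i := by omega
  rw [h1, h2]
theorem pvWinG_eq (t : Int) (cs : List Char) (i : Nat) (h : i + 7 ≤ cs.length) :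
    pvWinG t cs (i : Int) = ((((pvDiffs (cs.map pvDigit)).drop i).take 6).all (· == t)) := by
  have hds6 : 6 ≤ ((pvDiffs (cs.map pvDigit)).drop i).length := by
    rw [List.length_drop, length_pvDiffs]; simp; omega
  have hchunklen : ((cs.drop i).take 7).length = 7 := by simp; omega
  have hget : ∀ (k : Nat), k < 7 →
      PySem.List.pyGetD ((cs.drop i).take 7) ((k : Nat) : Int) ' ' = cs.getD (i + k) ' ' := by
    intro k hk
    rw [PySem.List.pyGetD_eq_getElem _ ' ' (by omega) (by rw [hchunklen]; exact_mod_cast hk)]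
    have hT : (((k : Nat) : Int)).toNat = k := by omega
    simp only [hT, List.getElem_take, List.getElem_drop]
    exact (List.getD_eq_getElem cs ' ' (by omega)).symm
  simp only [pvWinG, chunk_eq]
  rw [Bool.eq_iff_iff, take6_all_iff _ t hds6, List.all_eq_true]
  constructor
  · intro hall k hk
    have hmem : ((k : Nat) : Int) ∈ PySem.List.pyRange 0 6 1 := by
      rw [PySem.List.mem_pyRange_one]; omega
    have hx := hall _ hmem
    have hc : ((k : Nat) : Int) + 1 = (((k + 1 : Nat)) : Int) := by push_cast; ring
    rw [hc, hget (k + 1) (by omega), hget k (by omega)] at hx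
    rw [getD_drop_ds cs i k (by omega)]
    simp only [beq_iff_eq] at hx
    have e : i + (k + 1) = i + k + 1 := rfl
    rw [e] at hx
    omega
  · intro hall j hj
    rw [PySem.List.mem_pyRange_one] at hj
    obtain ⟨h0, h6⟩ := hj
    have hjk : j = ((j.toNat : Nat) : Int) := by omega
    rw [hjk]
    have hx := hall j.toNat (by omega)
    rw [getD_drop_ds cs i j.toNat (by omega)] at hx
    have hc : ((j.toNat : Nat) : Int) + 1 = (((j.toNat + 1 : Nat)) : Int) := by push_cast; ring
    rw [hc, hget (j.toNat + 1) (by omega), hget j.toNat (by omega)]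
    simp only [beq_iff_eq]
    have e : i + (j.toNat + 1) = i + j.toNat + 1 := rfl
    rw [e]
    omega
def pvLoopG (t : Int) (cs : List Char) : List Int → Bool
  | [] => false
  | i :: rest => if pvWinG t cs i then true else pvLoopG t cs rest
theorem pvLoopG_eq (t : Int) (cs : List Char) (i : Nat) :
    pvLoopG t cs (PySem.List.pyRange (i : Int) ((cs.length : Int) - 6) 1)
      = pvG t ((pvDiffs (cs.map pvDigit)).drop i) := by
  by_cases hlt : (i : Int) < (cs.length : Int) - 6
  · have hi7 : i + 7 ≤ cs.length := by omega
    have hdslen : ((pvDiffs (cs.map pvDigit)).drop i).length = cs.length - 1 - i := by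
      rw [List.length_drop, length_pvDiffs]; simp
    have hne : i < (pvDiffs (cs.map pvDigit)).length := by
      rw [length_pvDiffs]; simp; omega
    have hcons : (pvDiffs (cs.map pvDigit)).drop i
        = (pvDiffs (cs.map pvDigit))[i] :: (pvDiffs (cs.map pvDigit)).drop (i + 1) :=
      List.drop_eq_getElem_cons hne
    have ih := pvLoopG_eq t cs (i + 1)
    have hcast : ((i : Int)) + 1 = (((i + 1 : Nat)) : Int) := by push_cast; ring
    rw [PySem.List.pyRange_one_cons hlt]
    simp only [pvLoopG]
    rw [pvWinG_eq t cs i hi7]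
    cases hw : (((pvDiffs (cs.map pvDigit)).drop i).take 6).all (· == t) with
    | true =>
      rw [if_pos rfl]
      exact (pvG_head t _ (by rw [hdslen]; omega) hw).symm
    | false =>
      rw [if_neg (by simp)]
      rw [hcast, ih, hcons]
      simp only [pvG]
      rw [if_neg (by rw [← hcons, hdslen]; omega)]
      rw [show ((pvDiffs (cs.map pvDigit))[i] :: (pvDiffs (cs.map pvDigit)).drop (i + 1))
            = (pvDiffs (cs.map pvDigit)).drop i from hcons.symm]
      rw [hw, Bool.false_or]
  · rw [PySem.List.pyRange_one_eq_nil (by omega)]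
    simp only [pvLoopG]
    rw [pvG_short t _ (by rw [List.length_drop, length_pvDiffs]; simp; omega)]
termination_by cs.length - 6 - i
decreasing_by omega

theorem pvAscWin_eq_winG (cs : List Char) (i : Int) : pvAscWin cs i = pvWinG 1 cs i := rfl

theorem pvDescWin_eq_winG (cs : List Char) (i : Int) : pvDescWin cs i = pvWinG (-1) cs i := by
  simp only [pvDescWin, pvWinG, sub_eq_add_neg]

theorem pvAscLoop_eq (cs : List Char) : ∀ (r : List Int), pvAscLoop cs r = pvLoopG 1 cs r
  | [] => rfl
  | i :: rest => by
      simp only [pvAscLoop, pvLoopG, pvAscWin_eq_winG, pvAscLoop_eq cs rest]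

theorem pvDescLoop_eq (cs : List Char) : ∀ (r : List Int), pvDescLoop cs r = pvLoopG (-1) cs r
  | [] => rfl
  | i :: rest => by
      simp only [pvDescLoop, pvLoopG, pvDescWin_eq_winG, pvDescLoop_eq cs rest]

theorem pvRunPass_eq : ∀ (rest : List Char) (prev asc desc : Int) (ha hd : Bool),
    pvRunPass rest prev asc desc ha hd =
      (pvF 1 (pvDiffs (prev :: rest.map pvDigit)) asc ha,
       pvF (-1) (pvDiffs (prev :: rest.map pvDigit)) desc hd)
  | [], _, _, _, _, _ => rfl
  | ch :: rest, prev, asc, desc, ha, hd => by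
      have c1 : (pvDigit ch - prev == 1) = (pvDigit ch == prev + 1) := by
        by_cases hx : pvDigit ch = prev + 1
        · simp [hx]
        · simp [hx]; omega
      have c2 : (pvDigit ch - prev == -1) = (pvDigit ch == prev - 1) := by
        by_cases hx : pvDigit ch = prev - 1
        · simp [hx]
        · simp [hx]; omega
      simp only [List.map_cons, pvDiffs, pvF, pvRunPass, c1, c2]
      rw [pvRunPass_eq rest (pvDigit ch)]

theorem pvF_top (t : Int) (l : List Int) : pvF t l 1 false = pvG t l := by
  have := pvF_eq_pvG t l 1 false (by omega) (by omega)
  simpa using this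

theorem pvSeqScan_eq (cs : List Char) : pvSeqScanA cs = pvSeqScanB cs := by
  cases cs with
  | nil => rfl
  | cons c cr =>
    have hA := pvLoopG_eq 1 (c :: cr) 0
    have hD := pvLoopG_eq (-1) (c :: cr) 0
    have h0 : (((0 : Nat)) : Int) = (0 : Int) := rfl
    rw [h0, List.drop_zero] at hA hD
    have hB := pvRunPass_eq cr (pvDigit c) 1 1 false false
    simp only [pvSeqScanA, pvSeqScanB, List.tail_cons, List.headD_cons]
    rw [pvAscLoop_eq, pvDescLoop_eq, hA, hD]
    simp only [hB, pvF_top, List.map_cons]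
    rfl

theorem trailing_eq (cs : List Char) :
    (cs.length : Int) - (((cs.reverse.dropWhile (fun c => c == '0')).reverse).length : Int)
      = pvTrailingZeros cs := by
  have h := congrArg List.length
    (List.takeWhile_append_dropWhile (p := fun c => c == '0') (l := cs.reverse))
  rw [List.length_append] at h
  simp only [pvTrailingZeros, List.length_reverse] at *
  omega

-- ===== VERDICT (by name: the statement is the Claim_ definition above) =====
set_option maxHeartbeats 1000000 in
theorem check_fake_nid_spec : Claim_equal_check_fake_nid := by
  intro nid tz_limit tz_whitelist _dom _pre
  unfold Spec_check_fake_nid check_fake_nid check_fake_nid_alt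
  rw [trailing_eq nid.toList]
  have hseq := pvSeqScan_eq nid.toList
  split_ifs <;> first | exact hseq | rfl | tauto
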